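-- pv_equiv track=rewrite | github.com/harshit-singhania/cleancore-agent | src/ingestion/markdown_chunker.py | _split_by_semantic_boundaries
-- ===== SOURCE A (Python) =====
-- from typing import List, Dict, Any
--
-- def _split_by_semantic_boundaries(text: str) -> List[str]:
--     """
--     Split text by semantic boundaries (paragraphs, code blocks).
--     """
--     parts = []
--     current_part = []
--     in_code_block = False
--
--     for line in text.split('\n'):
--         if line.strip().startswith('```'):
--             if in_code_block:
--                 # End of code block
--                 current_part.append(line)
--                 parts.append('\n'.join(current_part) + '\n\n')
--                 current_part = []
--                 in_code_block = False
--             else: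
--                 # Start of code block - save any accumulated text
--                 if current_part:
--                     parts.append('\n'.join(current_part) + '\n\n')
--                     current_part = []
--                 in_code_block = True
--                 current_part.append(line)
--         else:
--             current_part.append(line)
--
--     # Don't forget remaining content
--     if current_part:
--         parts.append('\n'.join(current_part) + '\n\n')
--
--     return parts
-- ===== SOURCE B (Python) =====
-- def _split_by_semantic_boundaries(text):
--     """
--     Split text by semantic boundaries (paragraphs, code blocks).
--     Index-driven rewrite: a nested while loop consumes a whole fenced code
--     block at once instead of carrying an in_code_block flag.
--     """
--     lines = text.split('\n')
--     parts = []
--     pending = []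
--     i = 0
--     n = len(lines)
--     while i < n:
--         line = lines[i]
--         if line.strip().startswith('```'):
--             if pending:
--                 parts.append('\n'.join(pending) + '\n\n')
--                 pending = []
--             block = [line]
--             i += 1
--             while i < n:
--                 block.append(lines[i])
--                 i += 1
--                 if block[-1].strip().startswith('```'):
--                     break
--             parts.append('\n'.join(block) + '\n\n')
--         else:
--             pending.append(line)
--             i += 1
--     if pending:
--         parts.append('\n'.join(pending) + '\n\n')
--     return parts
-- ===== Notes on version B (the rewrite author's own statement) =====
-- stated objective: alternative
-- what changed: Replaces A's in_code_block boolean flag driving a single for-loop with an index-based outer while loop plus a nested inner loop that consumes an entire fenced code block at once, accumulating only plain paragraph lines between blocks.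
import Mathlib
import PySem

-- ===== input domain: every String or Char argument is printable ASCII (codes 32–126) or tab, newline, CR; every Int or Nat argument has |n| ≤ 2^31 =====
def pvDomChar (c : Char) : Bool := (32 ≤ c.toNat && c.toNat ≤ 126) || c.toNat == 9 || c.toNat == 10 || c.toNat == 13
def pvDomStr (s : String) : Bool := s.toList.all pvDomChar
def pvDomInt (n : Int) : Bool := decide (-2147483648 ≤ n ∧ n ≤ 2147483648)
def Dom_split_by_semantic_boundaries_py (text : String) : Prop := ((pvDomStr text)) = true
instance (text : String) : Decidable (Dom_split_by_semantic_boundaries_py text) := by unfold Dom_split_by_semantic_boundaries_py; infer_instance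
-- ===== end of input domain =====

-- B replaces A's in_code_block flag with an index-free nested block-consuming recursion (same O(n) cost; objective: alternative decomposition).


-- ===== PORT A =====
-- line.strip().startswith('```')
def pvFence (l : String) : Bool := PySem.Str.startswith (PySem.Str.strip l) "```"
-- '\n'.join(ls) + '\n\n'
def pvJoinNN (ls : List String) : String := PySem.Str.join "\n" ls ++ "\n\n"

-- A's loop body: state = (parts, current_part, in_code_block)
def pvAStep (st : List String × List String × Bool) (line : String) : List String × List String × Bool :=
  if pvFence line then
    if st.2.2 then (st.1 ++ [pvJoinNN (st.2.1 ++ [line])], [], false)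
    else if st.2.1.isEmpty then (st.1, [line], true)
    else (st.1 ++ [pvJoinNN st.2.1], [line], true)
  else (st.1, st.2.1 ++ [line], st.2.2)

def split_by_semantic_boundaries_py (text : String) : List String :=
  let st := ((PySem.Str.split? text "\n").getD []).foldl pvAStep ([], [], false)
  if st.2.1.isEmpty then st.1 else st.1 ++ [pvJoinNN st.2.1]

-- ===== PORT B =====
-- inner while loop: append lines to block, stop right after the first fence line
def pvTakeBlock : List String → List String → List String × List String
  | [], block => (block, [])
  | l :: rest, block => if pvFence l then (block ++ [l], rest) else pvTakeBlock rest (block ++ [l])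

theorem pvTakeBlock_len : ∀ (lines block : List String), (pvTakeBlock lines block).2.length ≤ lines.length := by
  intro lines
  induction lines with
  | nil => intro block; simp [pvTakeBlock]
  | cons l rest ih =>
      intro block
      simp only [pvTakeBlock]
      split
      · simp
      · exact le_trans (ih _) (by simp)

-- B's outer loop: pending non-fence lines; on a fence, flush pending, consume the block, emit it, continue
def pvBGo : List String → List String → List String
  | [], pending => if pending.isEmpty then [] else [pvJoinNN pending]
  | l :: rest, pending =>
    if pvFence l then
      (if pending.isEmpty then [] else [pvJoinNN pending]) ++
        (pvJoinNN (pvTakeBlock rest [l]).1 :: pvBGo (pvTakeBlock rest [l]).2 [])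
    else pvBGo rest (pending ++ [l])
termination_by lines _ => lines.length
decreasing_by
  · exact Nat.lt_succ_of_le (pvTakeBlock_len rest [l])
  · simp

def split_by_semantic_boundaries_py_alt (text : String) : List String :=
  pvBGo ((PySem.Str.split? text "\n").getD []) []

-- ===== PRECONDITION & SPEC =====
def Spec_split_by_semantic_boundaries_py (text : String) (out : List String) : Prop := out = split_by_semantic_boundaries_py_alt text
instance (text : String) (out : List String) : Decidable (Spec_split_by_semantic_boundaries_py text out) := by unfold Spec_split_by_semantic_boundaries_py; infer_instance

-- ===== CLAIM (what is proved, stated in full; the proofs are below) =====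
def Claim_equal_split_by_semantic_boundaries_py : Prop := ∀ (text : String), Dom_split_by_semantic_boundaries_py text → Spec_split_by_semantic_boundaries_py text (split_by_semantic_boundaries_py text)

-- ===== LEMMAS AND PROOFS =====

-- final flush of A's loop state (proof device)
def pvFinal (st : List String × List String × Bool) : List String :=
  if st.2.1.isEmpty then st.1 else st.1 ++ [pvJoinNN st.2.1]

-- A's loop, rewritten as emit-as-you-go structural recursion (proof device)
def pvAGo : List String → List String → Bool → List String
  | [], cur, _ => if cur.isEmpty then [] else [pvJoinNN cur]
  | l :: rest, cur, inCode =>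
    if pvFence l then
      if inCode then pvJoinNN (cur ++ [l]) :: pvAGo rest [] false
      else (if cur.isEmpty then [] else [pvJoinNN cur]) ++ pvAGo rest [l] true
    else pvAGo rest (cur ++ [l]) inCode

theorem pvFold_eq_aGo : ∀ (lines parts cur : List String) (inCode : Bool),
    pvFinal (lines.foldl pvAStep (parts, cur, inCode)) = parts ++ pvAGo lines cur inCode := by
  intro lines
  induction lines with
  | nil =>
      intro parts cur inCode
      simp only [List.foldl, pvAGo, pvFinal]
      split <;> simp
  | cons l rest ih =>
      intro parts cur inCode
      simp only [List.foldl, pvAGo, pvAStep]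
      by_cases hf : pvFence l
      · cases inCode with
        | true => simp [hf, ih]
        | false =>
            by_cases hc : cur.isEmpty
            · simp [hf, hc, ih]
            · simp [hf, hc, ih]
      · simp [hf, ih]

theorem pvAGo_true_block : ∀ (lines block : List String), block ≠ [] →
    pvAGo lines block true =
      pvJoinNN (pvTakeBlock lines block).1 :: pvAGo (pvTakeBlock lines block).2 [] false := by
  intro lines
  induction lines with
  | nil =>
      intro block hb
      simp [pvAGo, pvTakeBlock, List.isEmpty_iff, hb]
  | cons l rest ih =>
      intro block hb
      simp only [pvAGo, pvTakeBlock]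
      by_cases hf : pvFence l
      · simp [hf]
      · simp only [hf]
        exact ih (block ++ [l]) (by simp)

theorem pvAGo_false_eq_bGo : ∀ (lines pending : List String),
    pvAGo lines pending false = pvBGo lines pending
  | [], pending => by simp [pvAGo, pvBGo]
  | l :: rest, pending => by
      by_cases hf : pvFence l
      · rw [pvAGo, pvBGo]
        rw [pvAGo_true_block rest [l] (by simp),
            pvAGo_false_eq_bGo (pvTakeBlock rest [l]).2 []]
        simp [hf]
      · rw [pvAGo, pvBGo]
        simp [hf, pvAGo_false_eq_bGo rest (pending ++ [l])]
  termination_by lines _ => lines.length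
  decreasing_by
  all_goals first
    | exact Nat.lt_succ_of_le (pvTakeBlock_len rest [l])
    | simp

-- ===== VERDICT (by name: the statement is the Claim_ definition above) =====
theorem split_by_semantic_boundaries_py_spec : Claim_equal_split_by_semantic_boundaries_py := by
  intro text _
  show split_by_semantic_boundaries_py text = split_by_semantic_boundaries_py_alt text
  show pvFinal (((PySem.Str.split? text "\n").getD []).foldl pvAStep ([], [], false)) =
    split_by_semantic_boundaries_py_alt text
  rw [pvFold_eq_aGo, List.nil_append, pvAGo_false_eq_bGo]
  rfl
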